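-- pv_equiv track=rewrite | github.com/Jarrett-Blair/CV-DNA-Hybrid | Model_Scripts/util_order.py | hierarchy
-- ===== SOURCE A (Python) =====
-- import copy
--
-- def hierarchy(Y_ordered):
--     hierarchy_long = {"Phylum": Y_ordered.copy(),
--                       "Class": Y_ordered.copy(),
--                       "Order": Y_ordered.copy()}
--
--     i = 1
--     for level in hierarchy_long:
--         for j in range(len(hierarchy_long[level])):
--             input_string = hierarchy_long[level][j]
--             parts = input_string.split("_")
--             hierarchy_long[level][j] = "_".join(parts[:i])
--         i += 1
--
--     hierarchy_short = copy.deepcopy(hierarchy_long)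
--     for level in hierarchy_short:
--         for j in range(len(hierarchy_short[level])):
--             input_string = hierarchy_short[level][j]
--             parts = input_string.split("_")
--             hierarchy_short[level][j] = parts[-1]
--
--     return hierarchy_long, hierarchy_short
-- ===== SOURCE B (Python) =====
-- def hierarchy(Y_ordered):
--     # Character-scan algorithm: no split/join and no deepcopy. For each name,
--     # locate the underscore positions once; each long form is a prefix slice of
--     # the original string cut at the (i-1)-th underscore, and each short form is
--     # the slice between the two underscores bounding the kept last part.
--     longs = {"Phylum": [], "Class": [], "Order": []}
--     shorts = {"Phylum": [], "Class": [], "Order": []}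
--     for s in Y_ordered:
--         cuts = [j for j, c in enumerate(s) if c == "_"]
--         n = len(cuts)
--         for i, name in enumerate(longs, 1):
--             longs[name].append(s[:cuts[i - 1]] if i <= n else s)
--             k = i if i <= n else n + 1
--             start = cuts[k - 2] + 1 if k >= 2 else 0
--             end = cuts[k - 1] if k <= n else len(s)
--             shorts[name].append(s[start:end])
--     return longs, shorts
-- ===== Notes on version B (the rewrite author's own statement) =====
-- stated objective: alternative
-- what changed: B never splits or joins: it scans each name once for the positions of its underscores and produces every long form as a prefix slice of the original string cut at the (i-1)-th underscore and every short form as the slice between the two underscores bounding the kept last part, building all six lists in one pass with no copies and no deepcopy.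
import Mathlib
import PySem

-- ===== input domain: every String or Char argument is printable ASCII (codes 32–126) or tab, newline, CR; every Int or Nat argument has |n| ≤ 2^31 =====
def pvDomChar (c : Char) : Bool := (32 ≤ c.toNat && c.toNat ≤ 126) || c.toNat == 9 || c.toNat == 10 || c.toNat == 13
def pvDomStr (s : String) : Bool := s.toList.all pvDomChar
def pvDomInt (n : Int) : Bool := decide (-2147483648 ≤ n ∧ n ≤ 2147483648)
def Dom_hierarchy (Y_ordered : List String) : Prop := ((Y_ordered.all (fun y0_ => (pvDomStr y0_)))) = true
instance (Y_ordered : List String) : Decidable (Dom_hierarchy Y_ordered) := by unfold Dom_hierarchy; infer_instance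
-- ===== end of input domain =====

-- B is a character-scan re-implementation: it records the underscore positions of each
-- name once and produces each long/short form as a slice of the original string — no
-- split/join, no list copies, no deepcopy (objective: alternative).

-- ===== PORT A =====
-- inner loop of phase 1: for j in range(len(ys)): ys[j] = "_".join(ys[j].split("_")[:i])
-- (indices j come from range(len(ys)), so the total pyGetD/pySetD forms are exact here)
def pvLongStep (i : Int) (ys : List String) : List String :=
  (PySem.List.pyRange 0 ys.length 1).foldl
    (fun ys j =>
      let input_string := PySem.List.pyGetD ys j ""
      let parts := (PySem.Str.split? input_string "_").getD []   -- sep "_" ≠ "", never none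
      PySem.List.pySetD ys j (PySem.Str.join "_" (PySem.List.slice parts none (some i)))) ys

-- inner loop of phase 2: for j in range(len(ys)): ys[j] = ys[j].split("_")[-1]
-- (parts is never empty — str.split always returns at least one piece — so pyGetD is exact)
def pvShortStep (ys : List String) : List String :=
  (PySem.List.pyRange 0 ys.length 1).foldl
    (fun ys j =>
      let parts := (PySem.Str.split? (PySem.List.pyGetD ys j "") "_").getD []
      PySem.List.pySetD ys j (PySem.List.pyGetD parts (-1) "")) ys

def hierarchy (Y_ordered : List String) : (List (String × List String)) × (List (String × List String)) :=
  let hl0 : PySem.Dict String (List String) :=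
    ((PySem.Dict.empty.insert "Phylum" Y_ordered).insert "Class" Y_ordered).insert "Order" Y_ordered
  -- i = 1; for level in hierarchy_long: … ; i += 1
  let st := hl0.keys.foldl
      (fun (st : PySem.Dict String (List String) × Int) level =>
        (st.1.insert level (pvLongStep st.2 (st.1.getD level [])), st.2 + 1)) (hl0, 1)
  let hl := st.1
  -- hierarchy_short = deepcopy(hierarchy_long); for level in hierarchy_short: …
  let hs := hl.keys.foldl
      (fun (d : PySem.Dict String (List String)) level =>
        d.insert level (pvShortStep (d.getD level []))) hl
  (hl.items, hs.items)

-- ===== PORT B =====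
-- cuts = [j for j, c in enumerate(s) if c == "_"]
def pvCuts (s : String) : List Int :=
  ((PySem.List.enumerate s.toList 0).filter (fun p => p.2 == '_')).map (fun p => p.1)

-- loop body for one name s: for i, name in enumerate(longs, 1): append the two slices
-- (cuts indices are in range whenever Python's are, so the total pyGetD form is exact)
def pvStep (st : PySem.Dict String (List String) × PySem.Dict String (List String)) (s : String) :
    PySem.Dict String (List String) × PySem.Dict String (List String) :=
  let cuts := pvCuts s
  let n : Int := cuts.length
  (PySem.List.enumerate st.1.keys 1).foldl
    (fun (st : PySem.Dict String (List String) × PySem.Dict String (List String)) p =>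
      let i := p.1
      let name := p.2
      let long := if i ≤ n then PySem.Str.slice s none (some (PySem.List.pyGetD cuts (i - 1) 0)) else s
      let k := if i ≤ n then i else n + 1
      let start := if 2 ≤ k then PySem.List.pyGetD cuts (k - 2) 0 + 1 else 0
      let stop := if k ≤ n then PySem.List.pyGetD cuts (k - 1) 0 else PySem.Str.len s
      let short := PySem.Str.slice s (some start) (some stop)
      (st.1.modify name [] (· ++ [long]), st.2.modify name [] (· ++ [short])))
    st

def hierarchy_alt (Y_ordered : List String) : (List (String × List String)) × (List (String × List String)) :=
  let longs0 : PySem.Dict String (List String) :=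
    ((PySem.Dict.empty.insert "Phylum" []).insert "Class" []).insert "Order" []
  let shorts0 : PySem.Dict String (List String) :=
    ((PySem.Dict.empty.insert "Phylum" []).insert "Class" []).insert "Order" []
  let st := Y_ordered.foldl pvStep (longs0, shorts0)
  (st.1.items, st.2.items)

-- ===== PRECONDITION & SPEC =====
def Spec_hierarchy (Y_ordered : List String) (out : (List (String × List String)) × (List (String × List String))) : Prop := out = hierarchy_alt Y_ordered
instance (Y_ordered : List String) (out : (List (String × List String)) × (List (String × List String))) : Decidable (Spec_hierarchy Y_ordered out) := by unfold Spec_hierarchy; infer_instance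

-- ===== CLAIM (what is proved, stated in full; the proofs are below) =====
def Claim_equal_hierarchy : Prop := ∀ (Y_ordered : List String), Dom_hierarchy Y_ordered → Spec_hierarchy Y_ordered (hierarchy Y_ordered)

-- ===== LEMMAS AND PROOFS =====

-- ---- split on '_' as a plain recursion on the character list ----
def msplit : List Char → List Char → List (List Char)
  | [], cur => [cur.reverse]
  | c :: rest, cur => if c = '_' then cur.reverse :: msplit rest [] else msplit rest (c :: cur)

theorem go_eq (fuel : Nat) : ∀ (l cur : List Char) (acc : List (List Char)) (_ : l.length < fuel),
    PySem.Chars.splitOn.go ['_'] fuel l cur acc = acc.reverse ++ msplit l cur := by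
  induction fuel with
  | zero => intro l cur acc h; omega
  | succ n ih =>
    intro l cur acc h
    match l with
    | [] => rw [PySem.Chars.splitOn.go.eq_def]; simp [msplit]
    | c :: rest =>
      have hstep : PySem.Chars.splitOn.go ['_'] (n+1) (c::rest) cur acc =
          if ['_'].isPrefixOf (c::rest) = true then
            PySem.Chars.splitOn.go ['_'] n (List.drop ['_'].length (c::rest)) [] (cur.reverse :: acc)
          else PySem.Chars.splitOn.go ['_'] n rest (c :: cur) acc := rfl
      rw [hstep]
      by_cases hc : c = '_'
      · rw [show (['_'].isPrefixOf (c::rest)) = true by simp [List.isPrefixOf, hc]]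
        simp only [if_true, List.length_cons, List.drop_succ_cons]
        rw [show List.drop ([] : List Char).length rest = rest by simp]
        rw [ih rest [] (cur.reverse :: acc) (by simp at h; omega)]
        simp [msplit, hc]
      · rw [show (['_'].isPrefixOf (c::rest)) = false by
          simp [List.isPrefixOf]; exact fun e => hc e.symm]
        simp only [Bool.false_eq_true, if_false]
        rw [ih rest (c :: cur) acc (by simp at h ⊢; omega)]
        simp [msplit, hc]

theorem splitOn_eq (l : List Char) : PySem.Chars.splitOn l ['_'] = msplit l [] := by
  unfold PySem.Chars.splitOn
  rw [go_eq (l.length + 1) l [] [] (by omega)]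
  rfl

theorem msplit_ne_nil (l cur : List Char) : msplit l cur ≠ [] := by
  induction l generalizing cur with
  | nil => simp [msplit]
  | cons c rest ih => by_cases hc : c = '_' <;> simp [msplit, hc, ih]

-- accumulator elimination: msplit l cur prepends cur.reverse to the first part
theorem msplit_acc (l : List Char) : ∀ cur, msplit l cur =
    (cur.reverse ++ (msplit l []).headI) :: (msplit l []).tail := by
  induction l with
  | nil => intro cur; simp [msplit]
  | cons c rest ih =>
    intro cur
    by_cases hc : c = '_'
    · simp [msplit, hc]
    · simp only [msplit, if_neg hc]
      rw [ih (c :: cur), ih [c]]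
      simp

-- ---- underscore positions ----
def posU : List Char → List Nat
  | [] => []
  | c :: rest => if c = '_' then 0 :: (posU rest).map (· + 1) else (posU rest).map (· + 1)

theorem cuts_gen (l : List Char) : ∀ (t : Int),
    ((PySem.List.enumerate l t).filter (fun p => p.2 == '_')).map (fun p => p.1)
      = (posU l).map (fun (j : Nat) => t + (j : Int)) := by
  induction l with
  | nil => intro t; simp [PySem.List.enumerate_nil, posU]
  | cons c rest ih =>
    intro t
    rw [PySem.List.enumerate_cons]
    by_cases hc : c = '_'
    · rw [List.filter_cons_of_pos (by simp [hc])]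
      simp only [posU, if_pos hc, List.map_cons, List.map_map]
      rw [ih (t + 1)]
      congr 1
      · omega
      · apply List.map_congr_left
        intro j _
        simp only [Function.comp_apply]
        push_cast
        ring
    · rw [List.filter_cons_of_neg (by simp [hc])]
      simp only [posU, if_neg hc]
      rw [ih (t + 1), List.map_map]
      apply List.map_congr_left
      intro j _
      simp only [Function.comp_apply]
      push_cast
      ring

theorem cuts_eq (s : String) : pvCuts s = (posU s.toList).map (fun (j : Nat) => (j : Int)) := by
  unfold pvCuts
  rw [cuts_gen s.toList 0]
  simp

theorem len_msplit (l : List Char) : (msplit l []).length = (posU l).length + 1 := by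
  induction l with
  | nil => simp [msplit, posU]
  | cons c rest ih =>
    by_cases hc : c = '_'
    · simp [msplit, posU, hc, ih]
    · simp only [msplit, posU, if_neg hc]
      rw [msplit_acc rest [c]]
      simp only [List.length_cons, List.length_map]
      rw [show (posU rest).length = (msplit rest []).length - 1 by omega]
      have := msplit_ne_nil rest []
      cases h : msplit rest [] with
      | nil => exact absurd h this
      | cons a as => simp

theorem join_cons_head (d : List Char) (c : Char) (h : List Char) (r : List (List Char)) :
    PySem.Chars.join d ((c :: h) :: r) = c :: PySem.Chars.join d (h :: r) := by
  cases r with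
  | nil => simp [PySem.Chars.join_singleton]
  | cons q r => simp [PySem.Chars.join_cons_cons]

theorem join_nil_head (X : List (List Char)) (hX : X ≠ []) :
    PySem.Chars.join ['_'] ([] :: X) = '_' :: PySem.Chars.join ['_'] X := by
  cases X with
  | nil => exact absurd rfl hX
  | cons q r => simp [PySem.Chars.join_cons_cons]

theorem getD_map_add_one (L : List Nat) (m : Nat) (hm : m < L.length) :
    (L.map (· + 1)).getD m 0 = L.getD m 0 + 1 := by
  simp [List.getD_eq_getElem?_getD, List.getElem?_eq_getElem, hm]

theorem getD_map_f {α β : Type} (f : α → β) (L : List α) (j : Nat) (d : α) (d' : β)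
    (hj : j < L.length) : (L.map f).getD j d' = f (L.getD j d) := by
  simp [List.getD_eq_getElem?_getD, List.getElem?_eq_getElem, hj]

theorem getD_take {α : Type} (L : List α) (i j : Nat) (d : α) (hj : j < i) :
    (L.take i).getD j d = L.getD j d := by
  simp [List.getD_eq_getElem?_getD, List.getElem?_take, hj]

theorem msplit_cons_us (rest : List Char) : msplit ('_' :: rest) [] = [] :: msplit rest [] := by
  simp [msplit]

theorem msplit_cons_ne (c : Char) (rest : List Char) (hc : c ≠ '_') :
    msplit (c :: rest) [] = (c :: (msplit rest []).headI) :: (msplit rest []).tail := by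
  simp only [msplit, if_neg hc]
  rw [msplit_acc rest [c]]
  simp

theorem exists_cons_msplit (rest : List Char) : ∃ h tl, msplit rest [] = h :: tl := by
  cases e : msplit rest [] with
  | nil => exact absurd e (msplit_ne_nil rest [])
  | cons a as => exact ⟨a, as, rfl⟩

-- the join of the first i parts is the prefix of l up to the (i-1)-th underscore
theorem longL : ∀ (l : List Char) (i : Nat), 1 ≤ i →
    PySem.Chars.join ['_'] ((msplit l []).take i) =
      if i ≤ (posU l).length then l.take ((posU l).getD (i - 1) 0) else l := by
  intro l
  induction l with
  | nil =>
    intro i hi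
    match i, hi with
    | (m+1), _ => simp [msplit, posU, PySem.Chars.join_singleton]
  | cons c rest ih =>
    intro i hi
    by_cases hc : c = '_'
    · subst hc
      rw [msplit_cons_us, show posU ('_' :: rest) = 0 :: (posU rest).map (· + 1) from by
        simp [posU]]
      match i, hi with
      | 1, _ => simp [PySem.Chars.join_singleton]
      | (m+2), _ =>
        rw [List.take_succ_cons,
          join_nil_head _ (by
            intro hnil
            rcases List.take_eq_nil_iff.mp hnil with h | h
            · omega
            · exact msplit_ne_nil rest [] h),
          ih (m+1) (by omega)]
        by_cases hcond : m + 1 ≤ (posU rest).length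
        · rw [if_pos hcond, if_pos (by simp; omega)]
          have : (0 :: (posU rest).map (· + 1)).getD (m + 2 - 1) 0
              = (posU rest).getD (m + 1 - 1) 0 + 1 := by
            show ((posU rest).map (· + 1)).getD m 0 = _
            rw [getD_map_add_one _ _ (by omega)]
            simp
          rw [this, List.take_succ_cons]
        · rw [if_neg hcond, if_neg (by simp; omega)]
    · rw [msplit_cons_ne c rest hc, show posU (c :: rest) = (posU rest).map (· + 1) from by
        simp [posU, hc]]
      obtain ⟨h, tl, hP⟩ := exists_cons_msplit rest
      rw [hP]
      simp only [List.headI_cons, List.tail_cons]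
      match i, hi with
      | (m+1), _ =>
        rw [List.take_succ_cons, join_cons_head]
        have hIH := ih (m+1) (by omega)
        rw [hP, List.take_succ_cons] at hIH
        rw [hIH]
        by_cases hcond : m + 1 ≤ (posU rest).length
        · rw [if_pos hcond, if_pos (by simpa using hcond)]
          rw [Nat.add_sub_cancel, getD_map_add_one _ _ (by omega), List.take_succ_cons]
        · rw [if_neg hcond, if_neg (by simpa using hcond)]

-- part number j of the split is the slice of l between the bounding underscores
theorem msegment : ∀ (l : List Char) (j : Nat), j ≤ (posU l).length →
    (msplit l []).getD j [] =
      ((l.take (if j < (posU l).length then (posU l).getD j 0 else l.length)).drop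
        (if j = 0 then 0 else (posU l).getD (j - 1) 0 + 1)) := by
  intro l
  induction l with
  | nil =>
    intro j hj
    have hj0 : j = 0 := by simpa [posU] using hj
    subst hj0
    simp [msplit, posU]
  | cons c rest ih =>
    intro j hj
    by_cases hc : c = '_'
    · subst hc
      rw [msplit_cons_us, show posU ('_' :: rest) = 0 :: (posU rest).map (· + 1) from by
        simp [posU]]
      match j with
      | 0 => simp
      | (m+1) =>
        rw [show (([] : List Char) :: msplit rest []).getD (m+1) [] = (msplit rest []).getD m []
            from by simp]
        rw [ih m (by simp [posU] at hj; omega)]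
        have hE : (if m + 1 < (0 :: (posU rest).map (· + 1)).length
              then (0 :: (posU rest).map (· + 1)).getD (m+1) 0 else ('_' :: rest).length)
            = (if m < (posU rest).length then (posU rest).getD m 0 else rest.length) + 1 := by
          by_cases hcond : m < (posU rest).length
          · rw [if_pos (by simp; omega), if_pos hcond]
            show ((posU rest).map (· + 1)).getD m 0 = _
            rw [getD_map_add_one _ _ hcond]
          · rw [if_neg (by simp; omega), if_neg hcond]
            simp
        have hS : (if m + 1 = 0 then 0 else (0 :: (posU rest).map (· + 1)).getD (m + 1 - 1) 0 + 1)
            = (if m = 0 then 0 else (posU rest).getD (m - 1) 0 + 1) + 1 := by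
          rw [if_neg (by omega)]
          match m with
          | 0 => simp
          | (p+1) =>
            rw [if_neg (by omega)]
            show ((posU rest).map (· + 1)).getD p 0 + 1 = _
            rw [getD_map_add_one _ _ (by simp [posU] at hj; omega)]
            simp only [Nat.add_sub_cancel]
        rw [hE, hS, List.take_succ_cons, List.drop_succ_cons]
    · rw [msplit_cons_ne c rest hc, show posU (c :: rest) = (posU rest).map (· + 1) from by
        simp [posU, hc]]
      obtain ⟨h, tl, hP⟩ := exists_cons_msplit rest
      rw [hP]
      simp only [List.headI_cons, List.tail_cons]
      simp [posU, hc] at hj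
      match j with
      | 0 =>
        have hIH := ih 0 (by omega)
        rw [hP] at hIH
        simp only [List.getD_cons_zero] at hIH ⊢
        rw [hIH]
        have hE : (if 0 < ((posU rest).map (· + 1)).length
              then ((posU rest).map (· + 1)).getD 0 0 else (c :: rest).length)
            = (if 0 < (posU rest).length then (posU rest).getD 0 0 else rest.length) + 1 := by
          by_cases hcond : 0 < (posU rest).length
          · rw [if_pos (by simpa using hcond), if_pos hcond, getD_map_add_one _ _ hcond]
          · rw [if_neg (by simpa using hcond), if_neg hcond]
            simp
        rw [hE, List.take_succ_cons]
        simp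
      | (m+1) =>
        rw [show ((c :: h) :: tl).getD (m+1) [] = (h :: tl).getD (m+1) [] from by simp]
        have hIH := ih (m+1) (by omega)
        rw [hP] at hIH
        rw [hIH]
        have hE : (if m + 1 < ((posU rest).map (· + 1)).length
              then ((posU rest).map (· + 1)).getD (m+1) 0 else (c :: rest).length)
            = (if m + 1 < (posU rest).length then (posU rest).getD (m+1) 0 else rest.length) + 1 := by
          by_cases hcond : m + 1 < (posU rest).length
          · rw [if_pos (by simpa using hcond), if_pos hcond, getD_map_add_one _ _ hcond]
          · rw [if_neg (by simpa using hcond), if_neg hcond]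
            simp
        have hS : (if m + 1 = 0 then 0 else ((posU rest).map (· + 1)).getD (m + 1 - 1) 0 + 1)
            = (if m + 1 = 0 then 0 else (posU rest).getD (m + 1 - 1) 0 + 1) + 1 := by
          rw [if_neg (by omega), if_neg (by omega)]
          simp only [Nat.add_sub_cancel]
          rw [getD_map_add_one _ _ (by omega)]
        rw [hE, hS, List.take_succ_cons, List.drop_succ_cons]

-- xs[-1] on a nonempty list is its last element
theorem pyGetD_neg_one {α : Type} (xs : List α) (d : α) (h : xs ≠ []) :
    PySem.List.pyGetD xs (-1) d = xs.getD (xs.length - 1) d := by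
  unfold PySem.List.pyGetD PySem.List.pyGet? PySem.List.pyIdx?
  have hl : 1 ≤ xs.length := List.length_pos_iff.mpr h
  rw [if_neg (by omega), if_pos (by omega)]
  simp [List.getD_eq_getElem?_getD]

-- ---- per-string value functions-- ---- per-string value functions for the two ports ----
def lf (i : Int) (s : String) : String :=
  PySem.Str.join "_" (PySem.List.slice ((PySem.Str.split? s "_").getD []) none (some i))
def sf (t : String) : String :=
  PySem.List.pyGetD ((PySem.Str.split? t "_").getD []) (-1) ""
def gf (i : Int) (s : String) : String :=
  PySem.List.pyGetD (PySem.List.slice ((PySem.Str.split? s "_").getD []) none (some i)) (-1) ""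

def bl (i : Int) (s : String) : String :=
  let cuts := pvCuts s
  let n : Int := cuts.length
  if i ≤ n then PySem.Str.slice s none (some (PySem.List.pyGetD cuts (i - 1) 0)) else s

def bs (i : Int) (s : String) : String :=
  let cuts := pvCuts s
  let n : Int := cuts.length
  let k := if i ≤ n then i else n + 1
  let start := if 2 ≤ k then PySem.List.pyGetD cuts (k - 2) 0 + 1 else 0
  let stop := if k ≤ n then PySem.List.pyGetD cuts (k - 1) 0 else PySem.Str.len s
  PySem.Str.slice s (some start) (some stop)

theorem split_getD (s : String) :
    (PySem.Str.split? s "_").getD [] = (msplit s.toList []).map String.ofList := by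
  simp [PySem.Str.split?, PySem.Chars.split?, splitOn_eq, show ("_" : String).toList = ['_'] from rfl]

theorem toList_join_ofList (X : List (List Char)) :
    (PySem.Str.join "_" (X.map String.ofList)).toList = PySem.Chars.join ['_'] X := by
  rw [PySem.Str.toList_join]
  simp [List.map_map, Function.comp_def, show ("_" : String).toList = ['_'] from rfl]

theorem lf_eq_bl (i : Nat) (hi : 1 ≤ i) (s : String) : lf (i : Int) s = bl (i : Int) s := by
  refine String.toList_inj.mp ?_
  unfold lf bl
  rw [split_getD, PySem.List.slice_to _ (by positivity), Int.toNat_natCast, ← List.map_take,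
    toList_join_ofList, cuts_eq, longL s.toList i hi]
  by_cases hcond : i ≤ (posU s.toList).length
  · rw [if_pos hcond,
      if_pos (by simp only [List.length_map]; exact_mod_cast hcond),
      show (i : Int) - 1 = ((i - 1 : Nat) : Int) from by omega,
      PySem.List.pyGetD_natCast,
      getD_map_f (fun (j : Nat) => (j : Int)) _ _ 0 _ (by omega),
      PySem.Str.toList_slice, PySem.Chars.slice_eq_listSlice,
      PySem.List.slice_to_natCast]
  · rw [if_neg hcond, if_neg (by simp only [List.length_map]; exact_mod_cast hcond)]

theorem gf_eq_bs (i : Nat) (hi : 1 ≤ i) (s : String) : gf (i : Int) s = bs (i : Int) s := by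
  refine String.toList_inj.mp ?_
  unfold gf bs
  dsimp only
  rw [split_getD, PySem.List.slice_to _ (by positivity), Int.toNat_natCast, ← List.map_take,
    cuts_eq]
  set L := s.toList
  set P := posU L with hP
  have hlen : (msplit L []).length = P.length + 1 := by rw [hP]; exact len_msplit L
  set n := P.length with hn
  set k := min i (n + 1) with hk
  have hk1 : 1 ≤ k := by omega
  have hkn : k ≤ n + 1 := by omega
  have hki : k ≤ i := by omega
  -- left side: the (-1) lookup is the (k-1)-th part of the split
  have hne : ((msplit L []).take i).map String.ofList ≠ [] := by
    simp only [ne_eq, List.map_eq_nil_iff, List.take_eq_nil_iff]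
    push_neg
    exact ⟨by omega, msplit_ne_nil L []⟩
  rw [pyGetD_neg_one _ _ hne]
  have hlt : (((msplit L []).take i).map String.ofList).length = k := by
    simp [hlen, hk]
  rw [hlt, getD_map_f String.ofList _ _ [] _ (by simp [hlen]; omega),
    getD_take _ _ _ _ (by omega),
    show (msplit L []).getD (k-1) [] =
      ((L.take (if k-1 < P.length then P.getD (k-1) 0 else L.length)).drop
        (if k-1 = 0 then 0 else P.getD (k-1-1) 0 + 1)) from by
      rw [hP]; exact msegment L (k - 1) (by rw [← hP, ← hn]; omega)]
  -- right side: the slice between the bounding underscores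
  have hkeq : (if (i : Int) ≤ ((P.map (fun (j : Nat) => (j : Int))).length : Int)
      then (i : Int) else ((P.map (fun (j : Nat) => (j : Int))).length : Int) + 1) = (k : Int) := by
    simp only [List.length_map, ← hn]
    by_cases h : i ≤ n
    · rw [if_pos (by exact_mod_cast h)]
      rw [hk, Nat.min_eq_left (by omega)]
    · rw [if_neg (by exact_mod_cast h)]
      rw [hk, Nat.min_eq_right (by omega)]
      push_cast
      ring
  rw [hkeq]
  have hstart : (if 2 ≤ (k : Int)
        then PySem.List.pyGetD (P.map (fun (j : Nat) => (j : Int))) ((k : Int) - 2) 0 + 1 else 0)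
      = ((if k - 1 = 0 then 0 else P.getD (k - 1 - 1) 0 + 1 : Nat) : Int) := by
    by_cases h2 : 2 ≤ k
    · rw [if_pos (by exact_mod_cast h2), if_neg (by omega),
        show (k : Int) - 2 = ((k - 2 : Nat) : Int) from by omega,
        PySem.List.pyGetD_natCast,
        getD_map_f (fun (j : Nat) => (j : Int)) _ _ 0 _ (by omega),
        show k - 1 - 1 = k - 2 from by omega]
      push_cast
      ring
    · rw [if_neg (by exact_mod_cast h2), if_pos (by omega)]
      simp
  have hstop : (if (k : Int) ≤ ((P.map (fun (j : Nat) => (j : Int))).length : Int)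
        then PySem.List.pyGetD (P.map (fun (j : Nat) => (j : Int))) ((k : Int) - 1) 0
        else PySem.Str.len s)
      = ((if k - 1 < n then P.getD (k - 1) 0 else L.length : Nat) : Int) := by
    simp only [List.length_map, ← hn]
    by_cases h : k ≤ n
    · rw [if_pos (by exact_mod_cast h), if_pos (by omega),
        show (k : Int) - 1 = ((k - 1 : Nat) : Int) from by omega,
        PySem.List.pyGetD_natCast,
        getD_map_f (fun (j : Nat) => (j : Int)) _ _ 0 _ (by omega)]
    · rw [if_neg (by exact_mod_cast h), if_neg (by omega), PySem.Str.len_eq]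
  rw [hstart, hstop, PySem.Str.toList_slice, PySem.Chars.slice_eq_listSlice,
    PySem.List.slice_natCast, ← List.drop_take]
  simp
  rfl

theorem msplit_free (l : List Char) : ∀ cur, '_' ∉ cur → ∀ p ∈ msplit l cur, '_' ∉ p := by
  induction l with
  | nil => intro cur h p hp; simp [msplit] at hp; subst hp; simpa using h
  | cons c rest ih =>
    intro cur h p hp
    by_cases hc : c = '_'
    · subst hc; simp [msplit] at hp
      rcases hp with hp | hp
      · subst hp; simpa using h
      · exact ih [] (by simp) p hp
    · simp [msplit, hc] at hp
      exact ih (c :: cur) (by simp [h]; exact fun e => hc e.symm) p hp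

theorem msplit_append_free (p : List Char) : ∀ (l cur : List Char), '_' ∉ p →
    msplit (p ++ l) cur = msplit l (p.reverse ++ cur) := by
  induction p with
  | nil => simp
  | cons c rest ih =>
    intro l cur h
    simp only [List.mem_cons, not_or] at h
    simp only [List.cons_append, msplit, if_neg (fun e => h.1 (Eq.symm e))]
    rw [ih l (c :: cur) h.2]
    simp

theorem roundtrip : ∀ (parts : List (List Char)), parts ≠ [] → (∀ p ∈ parts, '_' ∉ p) →
    msplit (PySem.Chars.join ['_'] parts) [] = parts := by
  intro parts
  induction parts with
  | nil => simp
  | cons p rest ih =>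
    intro _ hfree
    match rest with
    | [] =>
      rw [PySem.Chars.join_singleton]
      rw [show p = p ++ ([] : List Char) by simp, msplit_append_free p [] [] (hfree p (by simp))]
      simp [msplit]
    | q :: rest' =>
      rw [PySem.Chars.join_cons_cons, List.append_assoc, List.singleton_append]
      rw [msplit_append_free p _ [] (hfree p (by simp))]
      simp only [List.append_nil]
      rw [show msplit ('_' :: PySem.Chars.join ['_'] (q::rest')) p.reverse
            = p.reverse.reverse :: msplit (PySem.Chars.join ['_'] (q::rest')) [] by
          simp [msplit]]
      simp [ih (by simp) (fun r hr => hfree r (by simp [hr]))]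

theorem key (i : Nat) (hi : 1 ≤ i) (s : String) : sf (lf (i : Int) s) = gf (i : Int) s := by
  unfold sf lf gf
  rw [split_getD s]
  rw [PySem.List.slice_to _ (by positivity), Int.toNat_natCast, ← List.map_take]
  rw [split_getD]
  have htl : (PySem.Str.join "_" (((msplit s.toList []).take i).map String.ofList)).toList
      = PySem.Chars.join ['_'] ((msplit s.toList []).take i) := by
    rw [PySem.Str.toList_join]
    simp [List.map_map, Function.comp_def, show ("_" : String).toList = ['_'] from rfl]
  rw [htl]
  rw [roundtrip _ (by
        intro hnil
        rcases List.take_eq_nil_iff.mp hnil with h | h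
        · omega
        · exact msplit_ne_nil _ _ h)
      (fun p hp => msplit_free s.toList [] (by simp) p (List.take_subset _ _ hp))]

theorem foldl_set_map (f : String → String) : ∀ (post pre : List String),
    (PySem.List.pyRange (pre.length) (pre.length + post.length) 1).foldl
      (fun ys j => PySem.List.pySetD ys j (f (PySem.List.pyGetD ys j ""))) (pre ++ post)
    = pre ++ post.map f := by
  intro post
  induction post with
  | nil => intro pre; simp [PySem.List.pyRange]
  | cons x xs ih =>
    intro pre
    rw [PySem.List.pyRange_one_cons (by push_cast [List.length_cons]; omega)]
    simp only [List.foldl_cons]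
    have hget : PySem.List.pyGetD (pre ++ x :: xs) (pre.length : Int) "" = x := by
      simp [PySem.List.pyGetD]
    have hset : PySem.List.pySetD (pre ++ x :: xs) (pre.length : Int) (f x) = (pre ++ [f x]) ++ xs := by
      rw [PySem.List.pySetD_natCast, List.set_append_right _ _ (le_refl pre.length)]
      simp
    rw [hget, hset]
    have := ih (pre ++ [f x])
    have hA : (((pre ++ [f x]).length : Nat) : Int) = (pre.length : Int) + 1 := by simp
    rw [hA] at this
    have hB : (pre.length : Int) + 1 + (xs.length : Int) = (pre.length : Int) + ((x::xs).length : Int) := by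
      push_cast [List.length_cons]; ring
    rw [hB] at this
    rw [this]
    simp

theorem pvLongStep_eq (i : Int) (ys : List String) : pvLongStep i ys = ys.map (lf i) := by
  unfold pvLongStep
  simpa [lf] using foldl_set_map (lf i) ys []

theorem pvShortStep_eq (ys : List String) : pvShortStep ys = ys.map sf := by
  unfold pvShortStep
  simpa [sf] using foldl_set_map sf ys []

-- B's per-name step appends exactly bl i s / bs i s at each of the three levels
theorem alt_step (s : String) (a1 a2 a3 b1 b2 b3 : List String) :
    pvStep (PySem.Dict.mk [("Phylum", a1), ("Class", a2), ("Order", a3)],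
            PySem.Dict.mk [("Phylum", b1), ("Class", b2), ("Order", b3)]) s
      = (PySem.Dict.mk [("Phylum", a1 ++ [bl 1 s]), ("Class", a2 ++ [bl 2 s]), ("Order", a3 ++ [bl 3 s])],
         PySem.Dict.mk [("Phylum", b1 ++ [bs 1 s]), ("Class", b2 ++ [bs 2 s]), ("Order", b3 ++ [bs 3 s])]) := by
  unfold pvStep bl bs
  simp [PySem.Dict.keys, PySem.List.enumerate, PySem.Dict.modify, PySem.Dict.insert,
    PySem.Dict.getD, PySem.Dict.get?, PySem.Dict.contains]

-- B's fold builds the six lists as maps of bl/bs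
theorem alt_fold : ∀ (Y : List String) (a1 a2 a3 b1 b2 b3 : List String),
    Y.foldl pvStep
      (PySem.Dict.mk [("Phylum", a1), ("Class", a2), ("Order", a3)],
       PySem.Dict.mk [("Phylum", b1), ("Class", b2), ("Order", b3)])
    = (PySem.Dict.mk [("Phylum", a1 ++ Y.map (bl 1)), ("Class", a2 ++ Y.map (bl 2)), ("Order", a3 ++ Y.map (bl 3))],
       PySem.Dict.mk [("Phylum", b1 ++ Y.map (bs 1)), ("Class", b2 ++ Y.map (bs 2)), ("Order", b3 ++ Y.map (bs 3))]) := by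
  intro Y
  induction Y with
  | nil => intro a1 a2 a3 b1 b2 b3; simp
  | cons x Y ih =>
    intro a1 a2 a3 b1 b2 b3
    rw [List.foldl_cons, alt_step, ih]
    simp

theorem alt_eq (Y : List String) : hierarchy_alt Y =
    ([("Phylum", Y.map (bl 1)), ("Class", Y.map (bl 2)), ("Order", Y.map (bl 3))],
     [("Phylum", Y.map (bs 1)), ("Class", Y.map (bs 2)), ("Order", Y.map (bs 3))]) := by
  unfold hierarchy_alt
  dsimp only
  rw [show (((PySem.Dict.empty.insert "Phylum" ([] : List String)).insert "Class" []).insert "Order" [])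
        = PySem.Dict.mk [("Phylum", []), ("Class", []), ("Order", [])] from by
      simp [PySem.Dict.empty, PySem.Dict.insert, PySem.Dict.contains]]
  rw [alt_fold]
  simp

theorem a_eq (Y : List String) : hierarchy Y =
    ([("Phylum", Y.map (lf 1)), ("Class", Y.map (lf 2)), ("Order", Y.map (lf 3))],
     [("Phylum", Y.map (fun s => sf (lf 1 s))), ("Class", Y.map (fun s => sf (lf 2 s))),
      ("Order", Y.map (fun s => sf (lf 3 s)))]) := by
  unfold hierarchy
  simp [PySem.Dict.empty, PySem.Dict.insert, PySem.Dict.contains, PySem.Dict.keys,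
    PySem.Dict.getD, PySem.Dict.get?,
    pvLongStep_eq, pvShortStep_eq, List.map_map]

set_option maxHeartbeats 1000000 in
theorem hierarchy_main (Y : List String) : hierarchy Y = hierarchy_alt Y := by
  have hl1 : Y.map (lf 1) = Y.map (bl 1) :=
    List.map_congr_left fun s _ => by simpa using lf_eq_bl 1 (by norm_num) s
  have hl2 : Y.map (lf 2) = Y.map (bl 2) :=
    List.map_congr_left fun s _ => by simpa using lf_eq_bl 2 (by norm_num) s
  have hl3 : Y.map (lf 3) = Y.map (bl 3) :=
    List.map_congr_left fun s _ => by simpa using lf_eq_bl 3 (by norm_num) s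
  have hs1 : Y.map (fun s => sf (lf 1 s)) = Y.map (bs 1) :=
    List.map_congr_left fun s _ => by
      have h1 := key 1 (by norm_num) s
      have h2 := gf_eq_bs 1 (by norm_num) s
      simp only [Nat.cast_one] at h1 h2
      rw [h1, h2]
  have hs2 : Y.map (fun s => sf (lf 2 s)) = Y.map (bs 2) :=
    List.map_congr_left fun s _ => by
      have h1 := key 2 (by norm_num) s
      have h2 := gf_eq_bs 2 (by norm_num) s
      simp only [Nat.cast_ofNat] at h1 h2
      rw [h1, h2]
  have hs3 : Y.map (fun s => sf (lf 3 s)) = Y.map (bs 3) :=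
    List.map_congr_left fun s _ => by
      have h1 := key 3 (by norm_num) s
      have h2 := gf_eq_bs 3 (by norm_num) s
      simp only [Nat.cast_ofNat] at h1 h2
      rw [h1, h2]
  rw [a_eq, alt_eq, hl1, hl2, hl3, hs1, hs2, hs3]

-- ===== VERDICT (by name: the statement is the Claim_ definition above) =====
theorem hierarchy_spec : Claim_equal_hierarchy := by
  intro Y _
  unfold Spec_hierarchy
  exact hierarchy_main Y
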